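-- pv_equiv track=rewrite | github.com/cdccnleo/RQA2025 | scripts/production_environment_test.py | generate_production_recommendations
-- ===== SOURCE A (Python) =====
-- from typing import Dict, List, Any, Optional, Tuple
--
-- def generate_production_recommendations(test_results: List[Dict]) -> List[str]:
--     """生成生产建议"""
--     recommendations = []
--
--     # 基于测试结果生成具体建议
--     failed_system_readiness = any(r.get('status') == 'FAILED' and r.get('test_name') == 'System Readiness'
--                                 for r in test_results)
--     if failed_system_readiness:
--         recommendations.append("🚨 优先解决系统就绪度问题，确保所有核心模块正常工作")
--
--     failed_functional = any(r.get('status') == 'FAILED' and r.get('test_name') == 'Functional Validation'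
--                           for r in test_results)
--     if failed_functional:
--         recommendations.append("🔧 完善功能验证，确保所有核心功能正常工作")
--
--     failed_performance = any(r.get('status') == 'FAILED' and r.get('test_name') == 'Performance Benchmarking'
--                            for r in test_results)
--     if failed_performance:
--         recommendations.append("⚡ 优化系统性能，解决性能瓶颈问题")
--
--     failed_security = any(r.get('status') == 'FAILED' and r.get('test_name') == 'Security Validation'
--                         for r in test_results)
--     if failed_security:
--         recommendations.append("🔒 加强安全性配置，解决安全漏洞")
--
--     # 通用建议
--     recommendations.extend([
--         "📊 建立完善的监控和告警系统",
--         "🔄 实施自动化部署和回滚机制",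
--         "📝 完善操作手册和故障排除指南",
--         "👥 建立生产环境运维团队培训",
--         "🔍 定期进行生产环境健康检查"
--     ])
--
--     return recommendations
-- ===== SOURCE B (Python) =====
-- def generate_production_recommendations(test_results):
--     """One pass collects failed test names into a set; each recommendation is then an O(1) membership check."""
--     failed = set()
--     for r in test_results:
--         if r.get('status') == 'FAILED':
--             failed.add(r.get('test_name'))
--
--     recommendations = []
--     if 'System Readiness' in failed:
--         recommendations.append("🚨 优先解决系统就绪度问题，确保所有核心模块正常工作")
--     if 'Functional Validation' in failed:
--         recommendations.append("🔧 完善功能验证，确保所有核心功能正常工作")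
--     if 'Performance Benchmarking' in failed:
--         recommendations.append("⚡ 优化系统性能，解决性能瓶颈问题")
--     if 'Security Validation' in failed:
--         recommendations.append("🔒 加强安全性配置，解决安全漏洞")
--
--     recommendations.extend([
--         "📊 建立完善的监控和告警系统",
--         "🔄 实施自动化部署和回滚机制",
--         "📝 完善操作手册和故障排除指南",
--         "👥 建立生产环境运维团队培训",
--         "🔍 定期进行生产环境健康检查"
--     ])
--     return recommendations
-- ===== Notes on version B (the rewrite author's own statement) =====
-- stated objective: simpler
-- what changed: A scans test_results four times (one any() per category); B makes a single pass building a set of failed test names and replaces each scan by a constant-time membership test.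
import Mathlib
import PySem

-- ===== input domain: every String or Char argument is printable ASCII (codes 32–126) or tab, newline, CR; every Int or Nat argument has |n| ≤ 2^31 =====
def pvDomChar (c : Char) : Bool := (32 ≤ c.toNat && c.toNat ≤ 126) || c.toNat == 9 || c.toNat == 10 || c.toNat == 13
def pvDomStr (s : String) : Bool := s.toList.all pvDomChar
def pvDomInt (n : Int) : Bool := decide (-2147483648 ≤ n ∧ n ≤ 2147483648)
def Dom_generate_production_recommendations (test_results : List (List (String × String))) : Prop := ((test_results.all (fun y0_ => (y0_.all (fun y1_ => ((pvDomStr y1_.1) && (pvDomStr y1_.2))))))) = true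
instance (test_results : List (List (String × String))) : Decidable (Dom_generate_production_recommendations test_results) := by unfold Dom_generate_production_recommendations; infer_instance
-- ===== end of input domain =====

-- B builds the set of failed test names in one pass instead of A's four any() scans; objective: simpler.

-- ===== PORT A =====
def generate_production_recommendations (test_results : List (List (String × String))) : List String :=
  (if test_results.any (fun r => ((PySem.Dict.mk r).get? "status" == some "FAILED") &&
        ((PySem.Dict.mk r).get? "test_name" == some "System Readiness"))
     then ["🚨 优先解决系统就绪度问题，确保所有核心模块正常工作"] else []) ++
  (if test_results.any (fun r => ((PySem.Dict.mk r).get? "status" == some "FAILED") &&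
        ((PySem.Dict.mk r).get? "test_name" == some "Functional Validation"))
     then ["🔧 完善功能验证，确保所有核心功能正常工作"] else []) ++
  (if test_results.any (fun r => ((PySem.Dict.mk r).get? "status" == some "FAILED") &&
        ((PySem.Dict.mk r).get? "test_name" == some "Performance Benchmarking"))
     then ["⚡ 优化系统性能，解决性能瓶颈问题"] else []) ++
  (if test_results.any (fun r => ((PySem.Dict.mk r).get? "status" == some "FAILED") &&
        ((PySem.Dict.mk r).get? "test_name" == some "Security Validation"))
     then ["🔒 加强安全性配置，解决安全漏洞"] else []) ++
  ["📊 建立完善的监控和告警系统",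
   "🔄 实施自动化部署和回滚机制",
   "📝 完善操作手册和故障排除指南",
   "👥 建立生产环境运维团队培训",
   "🔍 定期进行生产环境健康检查"]

-- ===== PORT B =====
-- the single pass: set of r.get('test_name') over the FAILED rows
def pvFailedSet (test_results : List (List (String × String))) : PySem.Set (Option String) :=
  test_results.foldl
    (fun s r => if (PySem.Dict.mk r).get? "status" == some "FAILED"
                  then PySem.Set.add s ((PySem.Dict.mk r).get? "test_name")
                  else s)
    PySem.Set.empty

def generate_production_recommendations_alt (test_results : List (List (String × String))) : List String :=
  let failed := pvFailedSet test_results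
  (if PySem.Set.contains failed (some "System Readiness")
     then ["🚨 优先解决系统就绪度问题，确保所有核心模块正常工作"] else []) ++
  (if PySem.Set.contains failed (some "Functional Validation")
     then ["🔧 完善功能验证，确保所有核心功能正常工作"] else []) ++
  (if PySem.Set.contains failed (some "Performance Benchmarking")
     then ["⚡ 优化系统性能，解决性能瓶颈问题"] else []) ++
  (if PySem.Set.contains failed (some "Security Validation")
     then ["🔒 加强安全性配置，解决安全漏洞"] else []) ++
  ["📊 建立完善的监控和告警系统",
   "🔄 实施自动化部署和回滚机制",
   "📝 完善操作手册和故障排除指南",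
   "👥 建立生产环境运维团队培训",
   "🔍 定期进行生产环境健康检查"]

-- ===== PRECONDITION & SPEC =====
def Spec_generate_production_recommendations (test_results : List (List (String × String))) (out : List String) : Prop := out = generate_production_recommendations_alt test_results
instance (test_results : List (List (String × String))) (out : List String) : Decidable (Spec_generate_production_recommendations test_results out) := by unfold Spec_generate_production_recommendations; infer_instance

-- ===== CLAIM (what is proved, stated in full; the proofs are below) =====
def Claim_equal_generate_production_recommendations : Prop := ∀ (test_results : List (List (String × String))), Dom_generate_production_recommendations test_results → Spec_generate_production_recommendations test_results (generate_production_recommendations test_results)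

-- ===== LEMMAS AND PROOFS =====

-- membership in the accumulated set ↔ some FAILED row has that test name
theorem mem_pvFailedSet_aux (tr : List (List (String × String))) (s : PySem.Set (Option String))
    (x : Option String) :
    (x ∈ tr.foldl
      (fun s r => if (PySem.Dict.mk r).get? "status" == some "FAILED"
                    then PySem.Set.add s ((PySem.Dict.mk r).get? "test_name")
                    else s) s)
      ↔ x ∈ s ∨ ∃ r ∈ tr, (PySem.Dict.mk r).get? "status" = some "FAILED" ∧
          x = (PySem.Dict.mk r).get? "test_name" := by
  induction tr generalizing s with
  | nil => simp
  | cons r tr ih =>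
    simp only [List.foldl_cons, ih, List.mem_cons]
    by_cases h : (PySem.Dict.mk r).get? "status" = some "FAILED" <;>
      simp [h, PySem.Set.mem_add]; tauto

theorem contains_pvFailedSet (tr : List (List (String × String))) (name : String) :
    PySem.Set.contains (pvFailedSet tr) (some name)
      = tr.any (fun r => ((PySem.Dict.mk r).get? "status" == some "FAILED") &&
          ((PySem.Dict.mk r).get? "test_name" == some name)) := by
  rw [Bool.eq_iff_iff, PySem.Set.contains_iff]
  unfold pvFailedSet
  rw [mem_pvFailedSet_aux]
  simp only [PySem.Set.empty, List.not_mem_nil, false_or, List.any_eq_true,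
    Bool.and_eq_true, beq_iff_eq]
  constructor
  · rintro ⟨r, hr, h1, h2⟩; exact ⟨r, hr, h1, h2.symm⟩
  · rintro ⟨r, hr, h1, h2⟩; exact ⟨r, hr, h1, h2.symm⟩

-- ===== VERDICT (by name: the statement is the Claim_ definition above) =====
theorem generate_production_recommendations_spec : Claim_equal_generate_production_recommendations := by
  intro tr _
  unfold Spec_generate_production_recommendations generate_production_recommendations generate_production_recommendations_alt
  simp only [contains_pvFailedSet]
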